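-- pv_equiv track=rewrite | github.com/ales27pm/monGARS | tools/monGARS_deep_scan/extractors/shells.py | _collect_comment_blocks
-- ===== SOURCE A (Python) =====
-- from typing import List
--
-- def _collect_comment_blocks(lines: List[str]) -> List[tuple[str, int, int]]:
--     blocks: List[tuple[str, int, int]] = []
--     current: List[str] = []
--     start_line = 1
--     for idx, line in enumerate(lines, start=1):
--         if line.strip().startswith("#"):
--             content = line.lstrip("# ")
--             if not current:
--                 start_line = idx
--             current.append(content)
--         else:
--             if current:
--                 blocks.append(("\n".join(current), start_line, idx - 1))
--                 current = []
--     if current: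
--         blocks.append(("\n".join(current), start_line, len(lines)))
--     return blocks
-- ===== SOURCE B (Python) =====
-- from itertools import groupby
-- from typing import List
--
-- def _collect_comment_blocks(lines: List[str]) -> List[tuple[str, int, int]]:
--     blocks: List[tuple[str, int, int]] = []
--     for is_comment, group in groupby(
--         enumerate(lines, start=1), key=lambda pair: pair[1].strip().startswith("#")
--     ):
--         if not is_comment:
--             continue
--         pairs = list(group)
--         content = "\n".join(line.lstrip("# ") for _, line in pairs)
--         blocks.append((content, pairs[0][0], pairs[-1][0]))
--     return blocks
-- ===== Notes on version B (the rewrite author's own statement) =====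
-- stated objective: idiomatic
-- what changed: Replaces the manual current/start_line accumulator with two flush sites by itertools.groupby over enumerate(lines, 1): comment runs become groups whose first/last indices give the range directly.
import Mathlib
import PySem

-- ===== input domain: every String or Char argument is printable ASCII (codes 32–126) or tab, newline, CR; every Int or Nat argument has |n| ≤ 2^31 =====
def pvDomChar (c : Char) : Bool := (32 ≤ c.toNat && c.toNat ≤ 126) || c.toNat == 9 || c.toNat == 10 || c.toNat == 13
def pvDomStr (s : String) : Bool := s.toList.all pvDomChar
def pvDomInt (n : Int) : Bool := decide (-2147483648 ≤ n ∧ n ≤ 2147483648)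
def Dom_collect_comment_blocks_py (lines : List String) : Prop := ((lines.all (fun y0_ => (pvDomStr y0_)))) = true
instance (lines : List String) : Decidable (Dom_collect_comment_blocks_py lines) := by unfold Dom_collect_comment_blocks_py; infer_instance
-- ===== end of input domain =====

-- B replaces A's manual accumulator/flush loop by grouping consecutive equal-key lines (groupby); same values, idiomatic decomposition.

-- ===== PORT A =====
-- line.strip().startswith("#")
def pvIsComment (s : String) : Bool := PySem.Str.startswith (PySem.Str.strip s) "#"

-- line.lstrip("# "): drop leading chars from the set {'#', ' '} (exact for str.lstrip with a chars argument)
def pvLstripHashSpace (s : String) : String := String.ofList (s.toList.dropWhile (fun c => c == '#' || c == ' '))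

def pvGoA (n : Int) : Int → List (String × Int × Int) → List String → Int → List String → List (String × Int × Int)
  | _idx, blocks, current, start_line, [] =>
      if current.isEmpty then blocks else blocks ++ [(PySem.Str.join "\n" current, start_line, n)]
  | idx, blocks, current, start_line, line :: rest =>
      if pvIsComment line then
        let content := pvLstripHashSpace line
        let start_line' := if current.isEmpty then idx else start_line
        pvGoA n (idx + 1) blocks (current ++ [content]) start_line' rest
      else
        if current.isEmpty then
          pvGoA n (idx + 1) blocks current start_line rest
        else
          pvGoA n (idx + 1) (blocks ++ [(PySem.Str.join "\n" current, start_line, idx - 1)]) [] start_line rest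

def collect_comment_blocks_py (lines : List String) : List (String × Int × Int) :=
  pvGoA (lines.length : Int) 1 [] [] 1 lines

-- ===== PORT B =====
-- enumerate(lines, start=1)
def pvEnum1 : Int → List String → List (Int × String)
  | _, [] => []
  | i, x :: xs => (i, x) :: pvEnum1 (i + 1) xs

-- itertools.groupby: maximal runs of equal key, each with its key
def pvRuns : List (Int × String) → List (Bool × List (Int × String))
  | [] => []
  | x :: xs =>
    match pvRuns xs with
    | (k, g) :: rs => if pvIsComment x.2 == k then (k, x :: g) :: rs else (pvIsComment x.2, [x]) :: (k, g) :: rs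
    | [] => [(pvIsComment x.2, [x])]

def pvMkBlock : Bool × List (Int × String) → Option (String × Int × Int)
  | (false, _) => none
  | (true, []) => none
  | (true, (i, l) :: rest) =>
      some (PySem.Str.join "\n" (((i, l) :: rest).map (fun p => pvLstripHashSpace p.2)), i, (rest.getLastD (i, l)).1)

def collect_comment_blocks_py_alt (lines : List String) : List (String × Int × Int) :=
  (pvRuns (pvEnum1 1 lines)).filterMap pvMkBlock

-- ===== PRECONDITION & SPEC =====
def Spec_collect_comment_blocks_py (lines : List String) (out : List (String × Int × Int)) : Prop := out = collect_comment_blocks_py_alt lines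
instance (lines : List String) (out : List (String × Int × Int)) : Decidable (Spec_collect_comment_blocks_py lines out) := by unfold Spec_collect_comment_blocks_py; infer_instance

-- ===== CLAIM (what is proved, stated in full; the proofs are below) =====
def Claim_equal_collect_comment_blocks_py : Prop := ∀ (lines : List String), Dom_collect_comment_blocks_py lines → Spec_collect_comment_blocks_py lines (collect_comment_blocks_py lines)

-- ===== LEMMAS AND PROOFS =====

-- merge a pending comment block (current, started at start) into the grouped tail
def pvMix (current : List String) (start idx : Int) : List (Bool × List (Int × String)) → List (String × Int × Int)
  | (true, g) :: rs =>
      (PySem.Str.join "\n" (current ++ g.map (fun p => pvLstripHashSpace p.2)),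
        (if current.isEmpty then idx else start),
        (g.getLastD (idx, "")).1) :: rs.filterMap pvMkBlock
  | rs =>
      (if current.isEmpty then [] else [(PySem.Str.join "\n" current, start, idx - 1)]) ++ rs.filterMap pvMkBlock

lemma pvGetLast_cons {α : Type} (a d : α) (l : List α) :
    ((a :: l).getLast?.getD d) = l.getLast?.getD a := by
  cases l with
  | nil => simp
  | cons b m =>
    rw [List.getLast?_cons_cons]
    have hs : (b :: m).getLast?.isSome := by simp [List.getLast?_isSome]
    cases hq : (b :: m).getLast? with
    | none => rw [hq] at hs; simp at hs
    | some v => simp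

lemma pvGetLast_ne_nil {α : Type} (l : List α) (h : l ≠ []) (d d' : α) :
    l.getLast?.getD d = l.getLast?.getD d' := by
  cases l with
  | nil => exact absurd rfl h
  | cons b m =>
    have hs : (b :: m).getLast?.isSome := by simp [List.getLast?_isSome]
    cases hq : (b :: m).getLast? with
    | none => rw [hq] at hs; simp at hs
    | some v => simp

lemma pvRuns_head : ∀ (l : List (Int × String)) (k : Bool) (g : List (Int × String)) rs,
    pvRuns l = (k, g) :: rs → g ≠ [] ∧ g.head? = l.head? := by
  intro l
  induction l with
  | nil => intro k g rs h; simp [pvRuns] at h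
  | cons x xs ih =>
    intro k g rs h
    simp only [pvRuns] at h
    cases hr : pvRuns xs with
    | nil =>
      rw [hr] at h
      injection h with h1 h2
      injection h1 with hk hg
      subst hg; simp
    | cons p ps =>
      obtain ⟨k', g'⟩ := p
      rw [hr] at h
      by_cases hk : (pvIsComment x.2 == k') = true
      · simp only [hk, if_true, List.cons.injEq, Prod.mk.injEq] at h
        obtain ⟨⟨hk1, hg⟩, hps⟩ := h
        subst hg; simp
      · have hk' : (pvIsComment x.2 == k') = false := by simpa using hk
        simp only [hk', Bool.false_eq_true, if_false, List.cons.injEq, Prod.mk.injEq] at h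
        obtain ⟨⟨hk1, hg⟩, hps⟩ := h
        subst hg; simp

lemma pvRuns_ne_nil (x : Int × String) (xs : List (Int × String)) : pvRuns (x :: xs) ≠ [] := by
  simp only [pvRuns]
  cases hq : pvRuns xs with
  | nil => simp
  | cons p ps =>
    obtain ⟨k, g⟩ := p
    by_cases hk : (pvIsComment x.2 == k) = true <;> simp [hk]

lemma pvMix_nil_comment (start idx : Int) (xs : List String) :
    pvMix [] start idx (pvRuns (pvEnum1 idx xs)) = (pvRuns (pvEnum1 idx xs)).filterMap pvMkBlock := by
  cases hr : pvRuns (pvEnum1 idx xs) with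
  | nil => simp [pvMix]
  | cons p rs =>
    obtain ⟨k, g⟩ := p
    cases k with
    | false => simp [pvMix, pvMkBlock]
    | true =>
      obtain ⟨hne, hhd⟩ := pvRuns_head _ _ _ _ hr
      cases xs with
      | nil => simp [pvEnum1, pvRuns] at hr
      | cons y ys =>
        simp only [pvEnum1, List.head?] at hhd
        cases g with
        | nil => exact absurd rfl hne
        | cons p0 g' =>
          simp at hhd
          subst hhd
          simp [pvMix, pvMkBlock, pvGetLast_cons]

lemma pvMain (n : Int) : ∀ (rest : List String) (idx : Int) blocks current start,
    idx + rest.length = n + 1 →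
    pvGoA n idx blocks current start rest =
      blocks ++ pvMix current start idx (pvRuns (pvEnum1 idx rest)) := by
  intro rest
  induction rest with
  | nil =>
    intro idx blocks current start h
    have hn : idx - 1 = n := by simp at h; omega
    cases hc : current.isEmpty <;>
      simp [pvGoA, pvEnum1, pvRuns, pvMix, hc, hn]
  | cons x xs ih =>
    intro idx blocks current start h
    have h' : (idx + 1) + (xs.length : Int) = n + 1 := by simp at h; omega
    by_cases hx : pvIsComment x = true
    · -- comment line
      simp only [pvGoA, hx, if_true]
      rw [ih (idx + 1) blocks (current ++ [pvLstripHashSpace x]) _ h']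
      congr 1
      have hcur' : (current ++ [pvLstripHashSpace x]).isEmpty = false := by simp
      simp only [pvEnum1]
      cases hr : pvRuns (pvEnum1 (idx + 1) xs) with
      | nil =>
        have hxs : xs = [] := by
          cases xs with
          | nil => rfl
          | cons y ys =>
            simp only [pvEnum1] at hr
            exact absurd hr (pvRuns_ne_nil _ _)
        subst hxs
        simp [pvEnum1, pvRuns, hx, pvMix, hcur']
      | cons p rs =>
        obtain ⟨k, g⟩ := p
        cases k with
        | true =>
          obtain ⟨hne, _⟩ := pvRuns_head _ _ _ _ hr
          simp only [pvRuns, hr, hx, beq_self_eq_true, if_true]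
          simp [pvMix, hcur', pvGetLast_cons,
            pvGetLast_ne_nil g hne ((idx + 1 : Int), "") ((idx : Int), x)]
        | false =>
          simp only [pvRuns, hr, hx]
          simp [pvMix, hcur']
    · -- non-comment line
      have hxf : pvIsComment x = false := by simpa using hx
      by_cases hc : current.isEmpty = true
      · simp only [pvGoA, hxf, Bool.false_eq_true, if_false, hc, if_true]
        have hcnil : current = [] := by simpa using hc
        subst hcnil
        rw [ih (idx + 1) blocks [] start h', pvMix_nil_comment]
        congr 1
        simp only [pvEnum1]
        cases hr : pvRuns (pvEnum1 (idx + 1) xs) with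
        | nil => simp [pvRuns, hr, hxf, pvMix, pvMkBlock]
        | cons p rs =>
          obtain ⟨k, g⟩ := p
          cases k with
          | true => simp [pvRuns, hr, hxf, pvMix, pvMkBlock]
          | false => simp [pvRuns, hr, hxf, pvMix, pvMkBlock]
      · have hcf : current.isEmpty = false := by simpa using hc
        simp only [pvGoA, hxf, Bool.false_eq_true, if_false, hcf]
        rw [ih (idx + 1) _ [] start h', pvMix_nil_comment]
        simp only [pvEnum1]
        cases hr : pvRuns (pvEnum1 (idx + 1) xs) with
        | nil => simp [pvRuns, hr, hxf, pvMix, pvMkBlock, hcf]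
        | cons p rs =>
          obtain ⟨k, g⟩ := p
          cases k with
          | true => simp [pvRuns, hr, hxf, pvMix, pvMkBlock, hcf]
          | false => simp [pvRuns, hr, hxf, pvMix, pvMkBlock, hcf]

-- ===== VERDICT (by name: the statement is the Claim_ definition above) =====
theorem collect_comment_blocks_py_spec : Claim_equal_collect_comment_blocks_py := by
  intro lines _
  unfold Spec_collect_comment_blocks_py collect_comment_blocks_py collect_comment_blocks_py_alt
  rw [pvMain (lines.length : Int) lines 1 [] [] 1 (by omega), pvMix_nil_comment]
  exact List.nil_append _
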